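-- pv_equiv track=rewrite | github.com/FujitsuResearch/LSPWD | utils/periodic_detection_helper.py | find_longest_identical_pair
-- ===== SOURCE A (Python) =====
-- def find_longest_identical_pair(s):
--     left = 0
--     right = len(s) - 1
--     id_pair = (None, -1, -1)
--     while left < right:
--         for i in range(left+1, right+1):
--             if s[left] == s[i]:
--                 if id_pair[2] - id_pair[1] < i - left:
--                     id_pair = (s[left], left, i)
--         left += 1
--     if id_pair[0] is None:
--         return None  # If no identical pair is found
--     else:
--         return id_pair
-- ===== SOURCE B (Python) =====
-- def find_longest_identical_pair(s):
--     # One pass: remember each character's first occurrence; the farthest pair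
--     # for a character is (first occurrence, current index).
--     first = {}
--     best = (None, -1, -1)
--     for j, ch in enumerate(s):
--         if ch in first:
--             i = first[ch]
--             if best[2] - best[1] < j - i:
--                 best = (ch, i, j)
--         else:
--             first[ch] = j
--     if best[0] is None:
--         return None
--     return best
-- ===== Notes on version B (the rewrite author's own statement) =====
-- stated objective: faster
-- what changed: Replaced the nested quadratic scan over all index pairs by a single pass that records each character's first occurrence in a dict and tracks the best (first-occurrence, current-index) distance with the same strict-improvement tie-break.
import Mathlib
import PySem

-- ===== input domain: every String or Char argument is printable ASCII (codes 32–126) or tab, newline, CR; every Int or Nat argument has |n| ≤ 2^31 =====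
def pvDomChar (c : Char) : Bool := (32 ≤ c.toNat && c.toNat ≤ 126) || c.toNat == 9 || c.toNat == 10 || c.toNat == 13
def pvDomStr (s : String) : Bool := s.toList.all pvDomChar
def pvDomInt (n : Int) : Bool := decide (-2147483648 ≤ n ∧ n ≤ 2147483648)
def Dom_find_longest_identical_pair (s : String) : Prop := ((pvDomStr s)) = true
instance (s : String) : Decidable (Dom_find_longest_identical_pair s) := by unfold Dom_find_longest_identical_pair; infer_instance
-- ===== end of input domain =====

-- B replaces A's quadratic scan over all index pairs by one pass with a dict of first
-- occurrences (objective: faster, asymptotic O(n^2) → O(n)); same return value everywhere.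

-- ===== PORT A =====
-- 'while left < right' with 'left += 1' is the loop 'for left in range(0, len(s)-1)'.
def find_longest_identical_pair (s : String) : Option (String × Int × Int) :=
  let n : Int := PySem.Str.len s
  let right : Int := n - 1
  let id_pair : Option String × Int × Int :=
    (PySem.List.pyRange 0 right 1).foldl (fun st left =>
      (PySem.List.pyRange (left+1) (right+1) 1).foldl (fun st i =>
        if PySem.Str.pyGet? s left == PySem.Str.pyGet? s i then
          if st.2.2 - st.2.1 < i - left then
            ((PySem.Str.pyGet? s left).map (fun c => String.ofList [c]), left, i)
          else st
        else st) st)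
      (none, -1, -1)
  match id_pair with
  | (none, _, _) => none
  | (some c, l, i) => some (c, l, i)

-- ===== PORT B =====
-- loop body of B: state is (first: dict of first occurrences, best triple); p = (j, ch)
def pvStepB (st : PySem.Dict Char Int × (Option String × Int × Int)) (p : Int × Char) :
    PySem.Dict Char Int × (Option String × Int × Int) :=
  if st.1.contains p.2 then
    let i := st.1.getD p.2 0
    if st.2.2.2 - st.2.2.1 < p.1 - i then
      (st.1, (some (String.ofList [p.2]), i, p.1))
    else st
  else (st.1.insert p.2 p.1, st.2)

def find_longest_identical_pair_alt (s : String) : Option (String × Int × Int) :=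
  let r := (PySem.List.enumerate s.toList 0).foldl pvStepB (PySem.Dict.empty, (none, -1, -1))
  match r.2 with
  | (none, _, _) => none
  | (some c, l, i) => some (c, l, i)

-- ===== PRECONDITION & SPEC =====
def Spec_find_longest_identical_pair (s : String) (out : Option (String × Int × Int)) : Prop := out = find_longest_identical_pair_alt s
instance (s : String) (out : Option (String × Int × Int)) : Decidable (Spec_find_longest_identical_pair s out) := by unfold Spec_find_longest_identical_pair; infer_instance

-- ===== CLAIM (what is proved, stated in full; the proofs are below) =====
def Claim_equal_find_longest_identical_pair : Prop := ∀ (s : String), Dom_find_longest_identical_pair s → Spec_find_longest_identical_pair s (find_longest_identical_pair s)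

-- ===== LEMMAS AND PROOFS =====

-- Abstract "best pair" machinery: both ports are shown to compute
-- pvRender cs (foldl pvF none ps) for their respective candidate-pair lists.

def pvD : Option (Int × Int) → Int
  | none => 0
  | some p => p.2 - p.1

def pvF (st : Option (Int × Int)) (p : Int × Int) : Option (Int × Int) :=
  if pvD st < p.2 - p.1 then some p else st

def pvChar (cs : List Char) (l : Int) : Char := PySem.List.pyGetD cs l ' '

def pvEmb (cs : List Char) : Option (Int × Int) → Option String × Int × Int
  | none => (none, -1, -1)
  | some p => (some (String.ofList [pvChar cs p.1]), p.1, p.2)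

def pvRender (cs : List Char) : Option (Int × Int) → Option (String × Int × Int)
  | none => none
  | some p => some (String.ofList [pvChar cs p.1], p.1, p.2)

def pvFi (cs : List Char) (j : Int) : Int :=
  (((PySem.List.index? cs (pvChar cs j)).getD 0 : Nat) : Int)

def pvPairs (cs : List Char) : List (Int × Int) :=
  (PySem.List.pyRange 0 ((cs.length : Int) - 1) 1).flatMap
    (fun l => (PySem.List.pyRange (l+1) (cs.length : Int) 1).map (fun i => (l, i)))

def pvCandA (cs : List Char) : List (Int × Int) :=
  (pvPairs cs).filter (fun p => pvChar cs p.1 == pvChar cs p.2)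

def pvCandB (cs : List Char) : List (Int × Int) :=
  (PySem.List.pyRange 0 (cs.length : Int) 1).filterMap
    (fun j => if pvFi cs j < j then some (pvFi cs j, j) else none)

def pvDict (ys : List Char) : PySem.Dict Char Int :=
  (PySem.List.enumerate ys 0).foldl
    (fun d p => if d.contains p.2 then d else d.insert p.2 p.1) PySem.Dict.empty

-- small bridges
lemma pv_idxOf?_of_mem {α : Type} [DecidableEq α] (l : List α) (c : α) (h : c ∈ l) :
    l.idxOf? c = some (l.idxOf c) := by
  simp [List.idxOf?, List.idxOf, List.findIdx?_eq_some_iff_findIdx_eq, List.findIdx_lt_length]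
  exact h

lemma pv_idxOf_le (l : List Char) (k : Nat) (c : Char) (hk : k < l.length) (h : l[k] = c) :
    l.idxOf c ≤ k := by
  by_contra hlt
  push Not at hlt
  exact absurd (List.not_of_lt_findIdx (xs := l) (p := (· == c)) (i := k) hlt)
    (by simpa using h)

lemma pv_emb_d (cs : List Char) (st : Option (Int × Int)) :
    (pvEmb cs st).2.2 - (pvEmb cs st).2.1 = pvD st := by
  cases st <;> simp [pvEmb, pvD]

-- membership characterisations
lemma pv_mem_pairs (cs : List Char) (p : Int × Int) :
    p ∈ pvPairs cs ↔ 0 ≤ p.1 ∧ p.1 < p.2 ∧ p.2 < (cs.length : Int) := by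
  unfold pvPairs
  simp only [List.mem_flatMap, List.mem_map, PySem.List.mem_pyRange_one]
  constructor
  · rintro ⟨l, ⟨hl0, hl1⟩, i, ⟨hi0, hi1⟩, rfl⟩
    exact ⟨hl0, by omega, hi1⟩
  · rintro ⟨h0, h1, h2⟩
    exact ⟨p.1, ⟨h0, by omega⟩, p.2, ⟨by omega, h2⟩, rfl⟩

lemma pv_mem_candA (cs : List Char) (p : Int × Int) :
    p ∈ pvCandA cs ↔
      (0 ≤ p.1 ∧ p.1 < p.2 ∧ p.2 < (cs.length : Int) ∧ pvChar cs p.1 = pvChar cs p.2) := by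
  unfold pvCandA
  rw [List.mem_filter, pv_mem_pairs, beq_iff_eq]
  tauto

lemma pv_char_natCast (cs : List Char) (k : Nat) :
    pvChar cs ((k : Nat) : Int) = cs.getD k ' ' := by
  simp [pvChar]

lemma pv_char_getElem (cs : List Char) (j : Int) (hj0 : 0 ≤ j) (hj : j < (cs.length : Int)) :
    pvChar cs j = cs[j.toNat]'(by omega) := by
  exact PySem.List.pyGetD_eq_getElem cs ' ' hj0 hj

-- pvFi facts (0 ≤ j < len): first index with the same character as position j
lemma pv_fi_nonneg (cs : List Char) (j : Int) : 0 ≤ pvFi cs j := by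
  simp [pvFi]

lemma pv_fi_eq_idxOf (cs : List Char) (j : Int) (hj0 : 0 ≤ j) (hj : j < (cs.length : Int)) :
    pvFi cs j = ((cs.idxOf (pvChar cs j) : Nat) : Int) := by
  have hmem : pvChar cs j ∈ cs := by
    rw [pv_char_getElem cs j hj0 hj]; exact List.getElem_mem _
  unfold pvFi
  rw [PySem.List.index?_eq_idxOf?, pv_idxOf?_of_mem _ _ hmem]
  rfl

lemma pv_fi_char (cs : List Char) (j : Int) (hj0 : 0 ≤ j) (hj : j < (cs.length : Int)) :
    pvChar cs (pvFi cs j) = pvChar cs j := by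
  have hmem : pvChar cs j ∈ cs := by
    rw [pv_char_getElem cs j hj0 hj]; exact List.getElem_mem _
  have hlt : cs.idxOf (pvChar cs j) < cs.length := List.idxOf_lt_length_of_mem hmem
  rw [pv_fi_eq_idxOf cs j hj0 hj, pv_char_natCast, List.getD_eq_getElem _ _ hlt,
    List.getElem_idxOf hlt]

lemma pv_fi_min (cs : List Char) (j l : Int) (hj0 : 0 ≤ j) (hj : j < (cs.length : Int))
    (hl0 : 0 ≤ l) (hl : l < (cs.length : Int)) (hc : pvChar cs l = pvChar cs j) :
    pvFi cs j ≤ l := by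
  rw [pv_fi_eq_idxOf cs j hj0 hj]
  have := pv_idxOf_le cs l.toNat (pvChar cs j) (by omega)
    (by rw [← pv_char_getElem cs l hl0 hl]; exact hc)
  omega

lemma pv_mem_candB (cs : List Char) (p : Int × Int) :
    p ∈ pvCandB cs ↔ ∃ j : Int, 0 ≤ j ∧ j < (cs.length : Int) ∧ pvFi cs j < j ∧ p = (pvFi cs j, j) := by
  unfold pvCandB
  simp only [List.mem_filterMap, PySem.List.mem_pyRange_one]
  constructor
  · rintro ⟨j, ⟨hj0, hj1⟩, hg⟩
    by_cases h : pvFi cs j < j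
    · rw [if_pos h] at hg
      exact ⟨j, hj0, hj1, h, (Option.some_inj.mp hg).symm⟩
    · rw [if_neg h] at hg; cases hg
  · rintro ⟨j, hj0, hj1, hlt, rfl⟩
    exact ⟨j, ⟨hj0, hj1⟩, by rw [if_pos hlt]⟩

lemma pv_candB_subset (cs : List Char) (p : Int × Int) (hp : p ∈ pvCandB cs) : p ∈ pvCandA cs := by
  obtain ⟨j, hj0, hj1, hlt, rfl⟩ := (pv_mem_candB cs p).mp hp
  exact (pv_mem_candA cs _).mpr
    ⟨pv_fi_nonneg cs j, hlt, hj1, pv_fi_char cs j hj0 hj1⟩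

-- order of the candidate lists
lemma pv_pairwise_A (cs : List Char) :
    (pvCandA cs).Pairwise (fun p q => p.1 < q.1 ∨ (p.1 = q.1 ∧ p.2 < q.2)) := by
  apply List.Pairwise.filter
  unfold pvPairs
  rw [List.pairwise_flatMap]
  constructor
  · intro a _
    rw [List.pairwise_map]
    exact (PySem.List.pairwise_lt_pyRange_one _ _).imp (fun h => Or.inr ⟨rfl, h⟩)
  · refine List.Pairwise.imp ?_ (PySem.List.pairwise_lt_pyRange_one 0 ((cs.length : Int) - 1))
    intro a b hab x hx y hy
    simp only [List.mem_map] at hx hy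
    obtain ⟨i, _, rfl⟩ := hx
    obtain ⟨i', _, rfl⟩ := hy
    exact Or.inl hab

lemma pv_pairwise_B (cs : List Char) :
    (pvCandB cs).Pairwise (fun p q => p.2 < q.2) := by
  unfold pvCandB
  refine List.Pairwise.filterMap _ ?_ (PySem.List.pairwise_lt_pyRange_one 0 (cs.length : Int))
  intro a b hab x hx y hy
  by_cases ha : pvFi cs a < a
  · rw [if_pos ha] at hx
    by_cases hb : pvFi cs b < b
    · rw [if_pos hb] at hy
      cases hx; cases hy; exact hab
    · rw [if_neg hb] at hy; cases hy
  · rw [if_neg ha] at hx; cases hx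

-- fold lemmas
lemma pv_fold_mem (ps : List (Int × Int)) (st : Option (Int × Int)) (p : Int × Int)
    (h : ps.foldl pvF st = some p) : p ∈ ps ∨ st = some p := by
  induction ps generalizing st with
  | nil => exact Or.inr h
  | cons q t ih =>
    rcases ih (pvF st q) h with hm | he
    · exact Or.inl (List.mem_cons_of_mem _ hm)
    · unfold pvF at he
      split at he
      · cases he; exact Or.inl List.mem_cons_self
      · exact Or.inr he

lemma pv_fold_lt (ps : List (Int × Int)) (M : Int) (st : Option (Int × Int))
    (hps : ∀ q ∈ ps, q.2 - q.1 < M) (hst : pvD st < M) : pvD (ps.foldl pvF st) < M := by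
  induction ps generalizing st with
  | nil => exact hst
  | cons q t ih =>
    refine ih (pvF st q) (fun r hr => hps r (List.mem_cons_of_mem _ hr)) ?_
    unfold pvF
    split
    · simpa [pvD] using hps q List.mem_cons_self
    · exact hst

lemma pv_fold_keep (ps : List (Int × Int)) (st : Option (Int × Int))
    (hps : ∀ q ∈ ps, q.2 - q.1 ≤ pvD st) : ps.foldl pvF st = st := by
  induction ps with
  | nil => rfl
  | cons q t ih =>
    have hq : pvF st q = st := by
      unfold pvF
      rw [if_neg (by have := hps q List.mem_cons_self; omega)]
    rw [List.foldl_cons, hq]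
    exact ih (fun r hr => hps r (List.mem_cons_of_mem _ hr))

lemma pv_fold_best (ps ps1 ps2 : List (Int × Int)) (p : Int × Int)
    (hsplit : ps = ps1 ++ p :: ps2)
    (h1 : ∀ q ∈ ps1, q.2 - q.1 < p.2 - p.1)
    (h2 : ∀ q ∈ ps2, q.2 - q.1 ≤ p.2 - p.1)
    (hp : 0 < p.2 - p.1) : ps.foldl pvF none = some p := by
  subst hsplit
  rw [List.foldl_append]
  have hlt : pvD (ps1.foldl pvF none) < p.2 - p.1 :=
    pv_fold_lt ps1 (p.2 - p.1) none h1 (by simpa [pvD] using hp)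
  rw [List.foldl_cons]
  rw [show pvF (ps1.foldl pvF none) p = some p from if_pos hlt]
  exact pv_fold_keep ps2 (some p) (by simpa [pvD] using h2)

lemma pv_split (ps : List (Int × Int)) (hne : ps ≠ []) :
    ∃ p ps1 ps2, ps = ps1 ++ p :: ps2 ∧ (∀ q ∈ ps1, q.2 - q.1 < p.2 - p.1) ∧
      (∀ q ∈ ps2, q.2 - q.1 ≤ p.2 - p.1) := by
  induction ps with
  | nil => exact absurd rfl hne
  | cons a t ih =>
    by_cases ht : t = []
    · subst ht
      exact ⟨a, [], [], rfl, by simp, by simp⟩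
    obtain ⟨p, ps1, ps2, hsp, h1, h2⟩ := ih ht
    by_cases h : p.2 - p.1 ≤ a.2 - a.1
    · refine ⟨a, [], t, rfl, by simp, ?_⟩
      intro q hq
      rw [hsp, List.mem_append, List.mem_cons] at hq
      rcases hq with hq | hq | hq
      · have := h1 q hq; omega
      · subst hq; omega
      · have := h2 q hq; omega
    · refine ⟨p, a :: ps1, ps2, by simp [hsp], ?_, h2⟩
      intro q hq
      rcases List.mem_cons.mp hq with rfl | hq
      · omega
      · exact h1 q hq

-- the combinatorial core: both candidate lists fold to the same best pair
lemma pv_core (cs : List Char) :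
    (pvCandA cs).foldl pvF none = (pvCandB cs).foldl pvF none := by
  by_cases hA : pvCandA cs = []
  · have hB : pvCandB cs = [] := by
      cases hBeq : pvCandB cs with
      | nil => rfl
      | cons b t =>
        exact absurd (pv_candB_subset cs b (by rw [hBeq]; exact List.mem_cons_self))
          (by rw [hA]; exact List.not_mem_nil)
    rw [hA, hB]
  · obtain ⟨p, ps1, ps2, hsp, h1, h2⟩ := pv_split _ hA
    have hpA : p ∈ pvCandA cs := by rw [hsp]; simp
    obtain ⟨hp0, hplt, hpn, hpc⟩ := (pv_mem_candA cs p).mp hpA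
    have hM : 0 < p.2 - p.1 := by omega
    have hmax : ∀ q ∈ pvCandA cs, q.2 - q.1 ≤ p.2 - p.1 := by
      intro q hq
      rw [hsp, List.mem_append, List.mem_cons] at hq
      rcases hq with hq | hq | hq
      · exact le_of_lt (h1 _ hq)
      · subst hq; omega
      · exact h2 _ hq
    have hfi : pvFi cs p.2 = p.1 := by
      have hle : pvFi cs p.2 ≤ p.1 := pv_fi_min cs p.2 p.1 (by omega) hpn hp0 (by omega) hpc
      rcases lt_or_eq_of_le hle with hlt' | h
      · exfalso
        have hq : (pvFi cs p.2, p.2) ∈ pvCandA cs := (pv_mem_candA cs _).mpr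
          ⟨pv_fi_nonneg cs p.2, by simp; omega, hpn, by
            simpa using pv_fi_char cs p.2 (by omega) hpn⟩
        have := hmax _ hq
        simp at this
        omega
      · exact h
    have hpB : p ∈ pvCandB cs := (pv_mem_candB cs p).mpr
      ⟨p.2, by omega, hpn, by omega, by rw [hfi]⟩
    obtain ⟨v1, v2, hvsp⟩ := List.append_of_mem hpB
    have hPB := pv_pairwise_B cs
    rw [hvsp, List.pairwise_append] at hPB
    have hv1lt : ∀ q ∈ v1, q.2 < p.2 := fun q hq => hPB.2.2 q hq p List.mem_cons_self
    have hPA := pv_pairwise_A cs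
    rw [hsp, List.pairwise_append, List.pairwise_cons] at hPA
    have hps2 : ∀ q ∈ ps2, p.1 ≤ q.1 := by
      intro q hq
      rcases hPA.2.1.1 q hq with h | ⟨h, _⟩ <;> omega
    have hv1 : ∀ q ∈ v1, q.2 - q.1 < p.2 - p.1 := by
      intro q hq
      have hqB : q ∈ pvCandB cs := by rw [hvsp]; exact List.mem_append_left _ hq
      have hqA := pv_candB_subset cs q hqB
      rcases lt_or_eq_of_le (hmax q hqA) with h | h
      · exact h
      · exfalso
        have hq1 : q.1 < p.1 := by have := hv1lt q hq; omega
        rw [hsp, List.mem_append, List.mem_cons] at hqA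
        rcases hqA with hm | hm | hm
        · have := h1 q hm; omega
        · subst hm; omega
        · have := hps2 q hm; omega
    have hv2 : ∀ q ∈ v2, q.2 - q.1 ≤ p.2 - p.1 := fun q hq =>
      hmax q (pv_candB_subset cs q (by rw [hvsp]; exact List.mem_append_right _ (List.mem_cons_of_mem _ hq)))
    rw [pv_fold_best _ ps1 ps2 p hsp h1 h2 hM, pv_fold_best _ v1 v2 p hvsp hv1 hv2 hM]

-- the concrete step of port A commutes with the abstract step through pvEmb
lemma pv_foldA_hom (s : String) (ps : List (Int × Int))
    (hb : ∀ p ∈ ps, 0 ≤ p.1 ∧ p.1 < p.2 ∧ p.2 < (s.toList.length : Int))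
    (st : Option (Int × Int)) :
    ps.foldl (fun st p =>
        if PySem.Str.pyGet? s p.1 == PySem.Str.pyGet? s p.2 then
          (if st.2.2 - st.2.1 < p.2 - p.1 then
            ((PySem.Str.pyGet? s p.1).map (fun c => String.ofList [c]), p.1, p.2)
          else st)
        else st) (pvEmb s.toList st)
      = pvEmb s.toList
          (ps.foldl (fun st p => if pvChar s.toList p.1 == pvChar s.toList p.2 then pvF st p else st) st) := by
  induction ps generalizing st with
  | nil => rfl
  | cons p t ih =>
    obtain ⟨hp0, hp12, hp2⟩ := hb p List.mem_cons_self
    have e1 : PySem.Str.pyGet? s p.1 = some (pvChar s.toList p.1) := by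
      have h1' : p.1 = ((p.1.toNat : Nat) : Int) := by omega
      rw [h1', PySem.Str.pyGet?_natCast, pv_char_natCast,
        List.getElem?_eq_getElem (by omega), List.getD_eq_getElem _ _ (by omega)]
    have e2 : PySem.Str.pyGet? s p.2 = some (pvChar s.toList p.2) := by
      have h2' : p.2 = ((p.2.toNat : Nat) : Int) := by omega
      rw [h2', PySem.Str.pyGet?_natCast, pv_char_natCast,
        List.getElem?_eq_getElem (by omega), List.getD_eq_getElem _ _ (by omega)]
    rw [List.foldl_cons, List.foldl_cons]
    have hstep : (if PySem.Str.pyGet? s p.1 == PySem.Str.pyGet? s p.2 then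
          (if (pvEmb s.toList st).2.2 - (pvEmb s.toList st).2.1 < p.2 - p.1 then
            ((PySem.Str.pyGet? s p.1).map (fun c => String.ofList [c]), p.1, p.2)
          else pvEmb s.toList st)
        else pvEmb s.toList st)
        = pvEmb s.toList (if pvChar s.toList p.1 == pvChar s.toList p.2 then pvF st p else st) := by
      rw [e1, e2, Option.some_beq_some, pv_emb_d]
      by_cases hc : pvChar s.toList p.1 = pvChar s.toList p.2
      · by_cases hd : pvD st < p.2 - p.1
        · simp [hc, pvF, if_pos hd, pvEmb]
        · simp [hc, pvF, if_neg hd]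
      · simp [if_neg (by simpa using hc)]
    show List.foldl _ (if PySem.Str.pyGet? s p.1 == PySem.Str.pyGet? s p.2 then
          (if (pvEmb s.toList st).2.2 - (pvEmb s.toList st).2.1 < p.2 - p.1 then
            ((PySem.Str.pyGet? s p.1).map (fun c => String.ofList [c]), p.1, p.2)
          else pvEmb s.toList st)
        else pvEmb s.toList st) t = _
    rw [hstep]
    exact ih (fun q hq => hb q (List.mem_cons_of_mem _ hq)) _

-- Port A computes pvRender of the fold over pvCandA
lemma pv_portA (s : String) :
    find_longest_identical_pair s = pvRender s.toList ((pvCandA s.toList).foldl pvF none) := by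
  unfold find_longest_identical_pair
  simp only [PySem.Str.len_eq]
  have hplus : (s.toList.length : Int) - 1 + 1 = (s.toList.length : Int) := by ring
  rw [hplus]
  have h1 : (PySem.List.pyRange 0 ((s.toList.length : Int) - 1)).foldl (fun st left =>
        (PySem.List.pyRange (left+1) (s.toList.length : Int)).foldl (fun st i =>
          if PySem.Str.pyGet? s left == PySem.Str.pyGet? s i then
            if st.2.2 - st.2.1 < i - left then
              ((PySem.Str.pyGet? s left).map (fun c => String.ofList [c]), left, i)
            else st
          else st) st)
        ((none : Option String), (-1 : Int), (-1 : Int))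
      = (pvPairs s.toList).foldl (fun st p =>
          if PySem.Str.pyGet? s p.1 == PySem.Str.pyGet? s p.2 then
            (if st.2.2 - st.2.1 < p.2 - p.1 then
              ((PySem.Str.pyGet? s p.1).map (fun c => String.ofList [c]), p.1, p.2)
            else st)
          else st) ((none : Option String), (-1 : Int), (-1 : Int)) := by
    unfold pvPairs
    rw [List.foldl_flatMap]
    simp only [List.foldl_map]
  rw [h1]
  have h2 := pv_foldA_hom s (pvPairs s.toList)
    (fun p hp => (pv_mem_pairs s.toList p).mp hp) none
  have hemb : pvEmb s.toList none = ((none : Option String), (-1 : Int), (-1 : Int)) := rfl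
  rw [← hemb, h2]
  have h3 : (pvPairs s.toList).foldl
        (fun st p => if pvChar s.toList p.1 == pvChar s.toList p.2 then pvF st p else st) none
      = (pvCandA s.toList).foldl pvF none := by
    exact (List.foldl_filter (p := fun p => pvChar s.toList p.1 == pvChar s.toList p.2)
      (f := pvF) (l := pvPairs s.toList) (init := none)).symm
  rw [h3]
  cases (pvCandA s.toList).foldl pvF none <;> rfl

-- idxOf over an append
lemma pv_idxOf_append (ys t : List Char) (c : Char) (h : c ∈ ys) :
    (ys ++ t).idxOf c = ys.idxOf c := by
  have h2 : c ∈ ys ++ t := List.mem_append_left _ h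
  have he := PySem.List.index?_append_of_mem (l := ys) t h
  rw [PySem.List.index?_eq_idxOf?, PySem.List.index?_eq_idxOf?,
    pv_idxOf?_of_mem _ _ h2, pv_idxOf?_of_mem _ _ h] at he
  exact Option.some_inj.mp he

lemma pv_idxOf_append_self (ys : List Char) (c : Char) (h : c ∉ ys) :
    (ys ++ [c]).idxOf c = ys.length := by
  have he := PySem.List.index?_append_singleton_self ys c h
  rw [PySem.List.index?_eq_idxOf?, pv_idxOf?_of_mem _ _ (by simp)] at he
  exact Option.some_inj.mp he

lemma pv_char_append (ys t : List Char) (j : Int) (hj0 : 0 ≤ j) (hj : j < (ys.length : Int)) :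
    pvChar (ys ++ t) j = pvChar ys j := by
  have hj' : j = ((j.toNat : Nat) : Int) := by omega
  rw [hj', pv_char_natCast, pv_char_natCast, List.getD_append _ _ _ _ (by omega)]

-- dict lemmas
lemma pv_dict_snoc (ys : List Char) (c : Char) :
    pvDict (ys ++ [c]) =
      (if (pvDict ys).contains c then pvDict ys else (pvDict ys).insert c (ys.length : Int)) := by
  unfold pvDict
  rw [PySem.List.enumerate_append, List.foldl_append]
  simp only [PySem.List.enumerate_cons, PySem.List.enumerate_nil, List.foldl_cons,
    List.foldl_nil, zero_add]

lemma pv_dict_contains (ys : List Char) (c : Char) :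
    (pvDict ys).contains c = decide (c ∈ ys) := by
  induction ys using List.reverseRecOn generalizing c with
  | nil => simp [pvDict, PySem.Dict.contains_empty]
  | append_singleton ys a ih =>
    rw [pv_dict_snoc]
    by_cases ha : (pvDict ys).contains a = true
    · rw [if_pos ha]
      have haa : a ∈ ys := by rw [ih a] at ha; exact of_decide_eq_true ha
      rw [ih c]
      by_cases hc : c = a
      · subst hc; simp [haa]
      · simp [hc]
    · rw [if_neg (by simpa using ha), PySem.Dict.contains_insert, ih c]
      by_cases hc : c = a <;> simp [hc]

lemma pv_dict_getD (ys : List Char) (c : Char) (hc : c ∈ ys) :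
    (pvDict ys).getD c 0 = ((ys.idxOf c : Nat) : Int) := by
  induction ys using List.reverseRecOn generalizing c with
  | nil => simp at hc
  | append_singleton ys a ih =>
    rw [pv_dict_snoc, pv_dict_contains]
    by_cases ha : a ∈ ys
    · rw [if_pos (by simpa using ha)]
      have hcys : c ∈ ys := by
        rcases List.mem_append.mp hc with h | h
        · exact h
        · simp at h; subst h; exact ha
      rw [ih c hcys, pv_idxOf_append ys [a] c hcys]
    · rw [if_neg (by simpa using ha)]
      by_cases hca : c = a
      · subst hca
        rw [PySem.Dict.getD_insert, if_pos rfl, pv_idxOf_append_self ys c ha]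
      · have hcys : c ∈ ys := by
          rcases List.mem_append.mp hc with h | h
          · exact h
          · simp at h; exact absurd h hca
        rw [PySem.Dict.getD_insert, if_neg hca, ih c hcys, pv_idxOf_append ys [a] c hcys]

lemma pv_candB_snoc (ys : List Char) (c : Char) :
    pvCandB (ys ++ [c]) = pvCandB ys ++
      (if c ∈ ys then [(((ys.idxOf c : Nat) : Int), (ys.length : Int))] else []) := by
  have hchar : pvChar (ys ++ [c]) (ys.length : Int) = c := by
    rw [pv_char_natCast, List.getD_eq_getElem _ _ (by simp)]
    simp
  unfold pvCandB
  have hlen : (((ys ++ [c]).length : Nat) : Int) = (ys.length : Int) + 1 := by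
    simp
  rw [hlen, PySem.List.pyRange_one_succ_right (Int.natCast_nonneg _), List.filterMap_append]
  congr 1
  · apply List.filterMap_congr
    intro j hj
    rw [PySem.List.mem_pyRange_one] at hj
    have hfi : pvFi (ys ++ [c]) j = pvFi ys j := by
      unfold pvFi
      rw [pv_char_append ys [c] j hj.1 hj.2]
      have hmem : pvChar ys j ∈ ys := by
        rw [pv_char_getElem ys j hj.1 hj.2]; exact List.getElem_mem _
      rw [PySem.List.index?_append_of_mem [c] hmem]
    rw [hfi]
  · by_cases hc : c ∈ ys
    · rw [if_pos hc]
      simp only [List.filterMap_cons, List.filterMap_nil]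
      have hfi : pvFi (ys ++ [c]) (ys.length : Int) = ((ys.idxOf c : Nat) : Int) := by
        unfold pvFi
        rw [hchar, PySem.List.index?_append_of_mem [c] hc, PySem.List.index?_eq_idxOf?,
          pv_idxOf?_of_mem _ _ hc]
        rfl
      rw [hfi]
      have hlt : ((ys.idxOf c : Nat) : Int) < (ys.length : Int) := by
        exact_mod_cast List.idxOf_lt_length_of_mem hc
      rw [if_pos hlt]
    · rw [if_neg hc]
      simp only [List.filterMap_cons, List.filterMap_nil]
      have hfi : pvFi (ys ++ [c]) (ys.length : Int) = (ys.length : Int) := by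
        unfold pvFi
        rw [hchar, PySem.List.index?_append_singleton_self ys c hc]
        rfl
      rw [hfi, if_neg (lt_irrefl _)]

lemma pv_emb_append (ys t : List Char) (r : Option (Int × Int))
    (hr : ∀ p, r = some p → 0 ≤ p.1 ∧ p.1 < (ys.length : Int)) :
    pvEmb (ys ++ t) r = pvEmb ys r := by
  cases r with
  | none => rfl
  | some p =>
    obtain ⟨h0, h1⟩ := hr p rfl
    simp [pvEmb, pv_char_append ys t p.1 h0 h1]

lemma pv_foldB_bound (ys : List Char) (p : Int × Int)
    (h : (pvCandB ys).foldl pvF none = some p) : 0 ≤ p.1 ∧ p.1 < (ys.length : Int) := by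
  rcases pv_fold_mem _ _ _ h with hm | he
  · obtain ⟨h0, h12, h2n, _⟩ := (pv_mem_candA ys p).mp (pv_candB_subset ys p hm)
    omega
  · cases he

-- Port B's fold: dict part is pvDict, best part is the abstract fold over pvCandB
lemma pv_portB_main (ys : List Char) :
    (PySem.List.enumerate ys 0).foldl pvStepB (PySem.Dict.empty, (none, -1, -1)) =
      (pvDict ys, pvEmb ys ((pvCandB ys).foldl pvF none)) := by
  induction ys using List.reverseRecOn with
  | nil => rfl
  | append_singleton ys c ih =>
    rw [PySem.List.enumerate_append, List.foldl_append, ih]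
    simp only [PySem.List.enumerate_cons, PySem.List.enumerate_nil, List.foldl_cons,
      List.foldl_nil, zero_add]
    simp only [pvStepB, pv_dict_contains]
    by_cases hc : c ∈ ys
    · rw [if_pos (by simpa using hc)]
      have hidx : ys.idxOf c < ys.length := List.idxOf_lt_length_of_mem hc
      have hdict : pvDict (ys ++ [c]) = pvDict ys := by
        rw [pv_dict_snoc, if_pos (by rw [pv_dict_contains]; simpa using hc)]
      rw [pv_dict_getD ys c hc, pv_candB_snoc, if_pos hc, List.foldl_append,
        List.foldl_cons, List.foldl_nil, pv_emb_d, hdict]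
      by_cases hd : pvD ((pvCandB ys).foldl pvF none) < (ys.length : Int) - ((ys.idxOf c : Nat) : Int)
      · rw [if_pos hd, show pvF ((pvCandB ys).foldl pvF none) (((ys.idxOf c : Nat) : Int), (ys.length : Int)) = some (((ys.idxOf c : Nat) : Int), (ys.length : Int)) from if_pos hd]
        have hch : pvChar (ys ++ [c]) ((ys.idxOf c : Nat) : Int) = c := by
          rw [pv_char_append ys [c] _ (Int.natCast_nonneg _) (by exact_mod_cast hidx),
            pv_char_natCast, List.getD_eq_getElem _ _ hidx, List.getElem_idxOf hidx]
        simp [pvEmb, hch]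
      · rw [if_neg hd, show pvF ((pvCandB ys).foldl pvF none) (((ys.idxOf c : Nat) : Int), (ys.length : Int)) = (pvCandB ys).foldl pvF none from if_neg hd]
        rw [pv_emb_append ys [c] _ (fun p hp => pv_foldB_bound ys p hp)]
    · rw [if_neg (by simpa using hc)]
      have hdict : pvDict (ys ++ [c]) = (pvDict ys).insert c (ys.length : Int) := by
        rw [pv_dict_snoc, if_neg (by rw [pv_dict_contains]; simpa using hc)]
      rw [pv_candB_snoc, if_neg hc, List.append_nil, hdict,
        pv_emb_append ys [c] _ (fun p hp => pv_foldB_bound ys p hp)]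

lemma pv_portB (s : String) :
    find_longest_identical_pair_alt s = pvRender s.toList ((pvCandB s.toList).foldl pvF none) := by
  unfold find_longest_identical_pair_alt
  rw [pv_portB_main]
  cases (pvCandB s.toList).foldl pvF none <;> rfl

-- ===== VERDICT (by name: the statement is the Claim_ definition above) =====
theorem find_longest_identical_pair_spec : Claim_equal_find_longest_identical_pair := by
  intro s _
  unfold Spec_find_longest_identical_pair
  rw [pv_portA, pv_portB, pv_core]
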